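-- pv_equiv track=rewrite | github.com/duochen/Python-Beginner | LearnToCodeBySolvingProblems/ch6/ccc13s1.py | is_distinct
-- ===== SOURCE A (Python) =====
-- def is_distinct(year):
--     """
--     year is an integer year.
--
--     Return True if year contains only distinct digits, False otherwise.
--     """
--     # Convert to string and then check for duplicate characters.
--     s = str(year)
--     used = []
--     for char in s:
--         if char in used:
--             return False
--         used.append(char)
--     return True
-- ===== SOURCE B (Python) =====
-- def is_distinct(year):
--     """
--     year is an integer year.
--
--     Return True if year contains only distinct digits, False otherwise.
--     """
--     s = str(year)
--     return len(set(s)) == len(s)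
-- ===== Notes on version B (the rewrite author's own statement) =====
-- stated objective: idiomatic
-- what changed: The explicit loop with a growing 'used' list and early return is replaced by a loop-free set-cardinality comparison: len(set(s)) == len(s).
import Mathlib
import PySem

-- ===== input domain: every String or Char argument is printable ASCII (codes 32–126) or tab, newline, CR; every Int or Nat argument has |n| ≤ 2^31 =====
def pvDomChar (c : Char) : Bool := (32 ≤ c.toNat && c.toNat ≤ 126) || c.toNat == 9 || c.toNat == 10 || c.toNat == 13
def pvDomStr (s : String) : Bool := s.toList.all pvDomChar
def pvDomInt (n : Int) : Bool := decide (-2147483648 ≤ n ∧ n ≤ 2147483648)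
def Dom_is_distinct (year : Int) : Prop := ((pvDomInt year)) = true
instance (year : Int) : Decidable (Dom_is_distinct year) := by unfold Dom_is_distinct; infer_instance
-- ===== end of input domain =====

-- B replaces A's membership loop with the idiomatic loop-free check len(set(s)) == len(s); same return value everywhere.

-- ===== PORT A =====
def isDistinctLoop : List Char → List Char → Bool
  | _used, [] => true
  | used, c :: rest => if used.contains c then false else isDistinctLoop (used ++ [c]) rest

def is_distinct (year : Int) : Bool :=
  isDistinctLoop [] (PySem.Int.toStr year).toList

-- ===== PORT B =====
def is_distinct_alt (year : Int) : Bool :=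
  let s := (PySem.Int.toStr year).toList
  PySem.Set.len (PySem.Set.ofList s) == s.length

-- ===== PRECONDITION & SPEC =====
def Spec_is_distinct (year : Int) (out : Bool) : Prop := out = is_distinct_alt year
instance (year : Int) (out : Bool) : Decidable (Spec_is_distinct year out) := by unfold Spec_is_distinct; infer_instance

-- ===== CLAIM (what is proved, stated in full; the proofs are below) =====
def Claim_equal_is_distinct : Prop := ∀ (year : Int), Dom_is_distinct year → Spec_is_distinct year (is_distinct year)

-- ===== LEMMAS AND PROOFS =====

theorem loopA_eq (l : List Char) : ∀ (used : List Char),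
    isDistinctLoop used l = decide (l.Nodup ∧ ∀ x ∈ l, x ∉ used) := by
  induction l with
  | nil => intro used; simp [isDistinctLoop]
  | cons c rest ih =>
    intro used
    by_cases h : c ∈ used
    · simp [isDistinctLoop, h]
    · simp only [isDistinctLoop, List.contains_eq_mem, h, decide_false, Bool.false_eq_true,
        if_false, ih, decide_eq_decide, List.nodup_cons, List.mem_cons, List.mem_append]
      constructor
      · rintro ⟨hn, hall⟩
        exact ⟨⟨fun hc => (hall c hc) (Or.inr (Or.inl rfl)), hn⟩,
          fun x hx => by rcases hx with hx | hx
                         · exact hx ▸ h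
                         · exact fun hu => (hall x hx) (Or.inl hu)⟩
      · rintro ⟨⟨hc, hn⟩, hall⟩
        refine ⟨hn, fun x hx hu => ?_⟩
        rcases hu with hu | hu | hu
        · exact (hall x (Or.inr hx)) hu
        · exact hc (hu ▸ hx)
        · exact absurd hu (List.not_mem_nil)

theorem length_foldl_add_le (l : List Char) : ∀ (s : List Char),
    (l.foldl PySem.Set.add s).length ≤ s.length + l.length := by
  induction l with
  | nil => intro s; simp
  | cons c rest ih =>
    intro s
    simp only [List.foldl_cons, List.length_cons]
    calc (rest.foldl PySem.Set.add (PySem.Set.add s c)).length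
        ≤ (PySem.Set.add s c).length + rest.length := ih _
      _ ≤ s.length + (rest.length + 1) := by
          unfold PySem.Set.add
          split
          · omega
          · simp; omega

theorem foldl_add_len_eq (l : List Char) : ∀ (s : List Char), s.Nodup →
    ((l.foldl PySem.Set.add s).length == s.length + l.length)
      = decide (l.Nodup ∧ ∀ x ∈ l, x ∉ s) := by
  induction l with
  | nil => intro s _; simp
  | cons c rest ih =>
    intro s hs
    simp only [List.foldl_cons, List.length_cons]
    by_cases h : c ∈ s
    · have hadd : PySem.Set.add s c = s := by
        simp [PySem.Set.add, PySem.Set.contains, List.contains_eq_mem, h]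
      rw [hadd]
      have hle := length_foldl_add_le rest s
      have hf : ((rest.foldl PySem.Set.add s).length == s.length + (rest.length + 1)) = false := by
        simp only [beq_eq_false_iff_ne, ne_eq]
        omega
      rw [hf]
      simp [h]
    · have hadd : PySem.Set.add s c = s ++ [c] := by
        simp [PySem.Set.add, PySem.Set.contains, List.contains_eq_mem, h]
      rw [hadd]
      have hs' : (s ++ [c]).Nodup := by
        simp only [List.nodup_append, List.nodup_cons, List.not_mem_nil, not_false_iff,
          List.nodup_nil, and_true, true_and]
        exact ⟨hs, by simpa using fun x hx (hxc : x = c) => h (hxc ▸ hx)⟩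
      have hkey := ih (s ++ [c]) hs'
      have hlen : (s ++ [c]).length = s.length + 1 := by simp
      rw [hlen] at hkey
      have harith : s.length + (rest.length + 1) = s.length + 1 + rest.length := by omega
      rw [harith, hkey, decide_eq_decide]
      simp only [List.nodup_cons, List.mem_cons, List.mem_append]
      constructor
      · rintro ⟨hn, hall⟩
        refine ⟨⟨fun hc => (hall c hc) (Or.inr (Or.inl rfl)), hn⟩, fun x hx => ?_⟩
        rcases hx with hx | hx
        · exact hx ▸ h
        · exact fun hu => (hall x hx) (Or.inl hu)
      · rintro ⟨⟨hc, hn⟩, hall⟩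
        refine ⟨hn, fun x hx hu => ?_⟩
        rcases hu with hu | hu | hu
        · exact (hall x (Or.inr hx)) hu
        · exact hc (hu ▸ hx)
        · exact absurd hu (List.not_mem_nil)

theorem altB_eq (l : List Char) :
    (PySem.Set.len (PySem.Set.ofList l) == (l.length : Int)) = decide l.Nodup := by
  have h := foldl_add_len_eq l [] List.nodup_nil
  simp only [List.length_nil, Nat.zero_add, List.not_mem_nil, not_false_iff,
    implies_true, and_true] at h
  rw [show PySem.Set.len (PySem.Set.ofList l) = ((PySem.Set.ofList l).length : Int) from rfl,
    PySem.Set.ofList_eq_foldl]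
  rw [show ((((l.foldl PySem.Set.add []).length : Nat) : Int) == ((l.length : Nat) : Int))
      = ((l.foldl PySem.Set.add []).length == l.length) by simp, h]

-- ===== VERDICT (by name: the statement is the Claim_ definition above) =====
theorem is_distinct_spec : Claim_equal_is_distinct := by
  intro year _
  unfold Spec_is_distinct is_distinct is_distinct_alt
  rw [loopA_eq, altB_eq]
  simp
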